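-- pv_equiv track=rewrite | github.com/eito24/6.009_Intro_to_Programming_Sp20 | lab2/lab.py | movie_list
-- ===== SOURCE A (Python) =====
-- def movie_list(data):
--     movie_book={}
--     for i in range(len(data)):
--         if data[i][2] not in movie_book:
--             movie_book[data[i][2]]=set()
--         if data[i][0] not in movie_book[data[i][2]]:
--             movie_book[data[i][2]].add(data[i][0])
--         if data[i][1] not in movie_book[data[i][2]]:
--             movie_book[data[i][2]].add(data[i][1])
--     return movie_book
-- ===== SOURCE B (Python) =====
-- def movie_list(data):
--     movie_book = {}
--     for movie in dict.fromkeys(row[2] for row in data):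
--         members = set()
--         for row in data:
--             if row[2] == movie:
--                 members.add(row[0])
--                 members.add(row[1])
--         movie_book[movie] = members
--     return movie_book
-- ===== Notes on version B (the rewrite author's own statement) =====
-- stated objective: alternative
-- what changed: Instead of A's single pass that maintains a dict of sets with explicit membership checks, B first collects the distinct movie ids in order (dict.fromkeys) and then builds each movie's actor set by a separate scan over the data.
import Mathlib
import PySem

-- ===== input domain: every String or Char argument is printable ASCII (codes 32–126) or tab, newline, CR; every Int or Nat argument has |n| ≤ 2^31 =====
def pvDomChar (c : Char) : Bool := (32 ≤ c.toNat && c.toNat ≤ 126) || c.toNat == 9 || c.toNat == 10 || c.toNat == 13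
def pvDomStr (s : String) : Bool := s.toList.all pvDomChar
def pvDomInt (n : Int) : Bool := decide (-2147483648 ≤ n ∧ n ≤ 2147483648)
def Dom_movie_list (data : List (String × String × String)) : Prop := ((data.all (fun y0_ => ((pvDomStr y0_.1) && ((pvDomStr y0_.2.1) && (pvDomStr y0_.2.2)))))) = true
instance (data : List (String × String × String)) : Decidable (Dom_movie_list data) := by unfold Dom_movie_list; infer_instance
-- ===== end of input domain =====

-- B replaces A's single maintaining pass (dict of sets updated in place) by a two-phase
-- grouping: first the distinct movie ids in order, then one scan per movie collecting its
-- actors; same return value, a genuinely different traversal (alternative, not faster).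


-- ===== PORT A =====
-- one loop iteration of A: ensure the movie key exists, then conditionally add each actor
def pvStepA (book : PySem.Dict String (List String)) (r : String × String × String) :
    PySem.Dict String (List String) :=
  let b1 := if (book.get? r.2.2).isNone then book.insert r.2.2 [] else book
  let b2 := if (b1.getD r.2.2 []).contains r.1 then b1
            else b1.modify r.2.2 [] (fun s => s ++ [r.1])
  if (b2.getD r.2.2 []).contains r.2.1 then b2
  else b2.modify r.2.2 [] (fun s => s ++ [r.2.1])

def movie_list (data : List (String × String × String)) : List (String × List String) :=
  (data.foldl pvStepA (PySem.Dict.mk [])).items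

-- ===== PORT B =====
-- members-set for one movie: one scan over data adding both actors of matching rows
def pvCollect (data : List (String × String × String)) (m : String) : List String :=
  data.foldl (fun s r => if r.2.2 == m then PySem.Set.add (PySem.Set.add s r.1) r.2.1 else s) []

def movie_list_alt (data : List (String × String × String)) : List (String × List String) :=
  ((PySem.List.dedup (data.map (fun r => r.2.2))).foldl
      (fun book m => book.insert m (pvCollect data m)) (PySem.Dict.mk [])).items

-- ===== PRECONDITION & SPEC =====
def Spec_movie_list (data : List (String × String × String)) (out : List (String × List String)) : Prop := out = movie_list_alt data
instance (data : List (String × String × String)) (out : List (String × List String)) : Decidable (Spec_movie_list data out) := by unfold Spec_movie_list; infer_instance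

-- ===== CLAIM (what is proved, stated in full; the proofs are below) =====
def Claim_equal_movie_list : Prop := ∀ (data : List (String × String × String)), Dom_movie_list data → Spec_movie_list data (movie_list data)

-- ===== LEMMAS AND PROOFS =====

-- get? on a dict whose items are D mapped through (m, f m)
theorem pv_get?_mapped (D : List String) (f : String → List String) (k : String) (hk : k ∈ D) :
    (PySem.Dict.mk (D.map (fun m => (m, f m)))).get? k = some (f k) := by
  induction D with
  | nil => cases hk
  | cons m D ih =>
    simp only [PySem.Dict.get?, List.map_cons, List.find?_cons] at *
    by_cases h : m = k
    · subst h; simp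
    · have : (m == k) = false := by simp [h]
      simp only [this]
      rcases List.mem_cons.mp hk with h' | h'
      · exact absurd h'.symm h
      · exact ih h'

theorem pv_get?_mapped_none (D : List String) (f : String → List String) (k : String) (hk : k ∉ D) :
    (PySem.Dict.mk (D.map (fun m => (m, f m)))).get? k = none := by
  simp only [PySem.Dict.get?, Option.map_eq_none_iff]
  rw [List.find?_eq_none]
  rintro ⟨a, b⟩ hab
  rcases List.mem_map.mp hab with ⟨m, hm, hEq⟩
  cases hEq
  exact fun h => hk ((eq_of_beq h) ▸ hm)

theorem pv_contains_mapped (D : List String) (f : String → List String) (k : String) (hk : k ∉ D) :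
    (PySem.Dict.mk (D.map (fun m => (m, f m)))).contains k = false := by
  simp only [PySem.Dict.contains, List.any_eq_false]
  rintro ⟨a, b⟩ hab
  rcases List.mem_map.mp hab with ⟨m, hm, hEq⟩
  cases hEq
  exact fun h => hk ((eq_of_beq h) ▸ hm)

theorem pv_contains_mapped_mem (D : List String) (f : String → List String) (k : String) (hk : k ∈ D) :
    (PySem.Dict.mk (D.map (fun m => (m, f m)))).contains k = true := by
  simp only [PySem.Dict.contains, List.any_eq_true]
  exact ⟨(k, f k), List.mem_map.mpr ⟨k, hk, rfl⟩, by simp⟩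

theorem pv_insert_mapped_mem (D : List String) (f : String → List String) (k : String)
    (hk : k ∈ D) (v : List String) :
    (PySem.Dict.mk (D.map (fun m => (m, f m)))).insert k v
      = PySem.Dict.mk (D.map (fun m => (m, if m = k then v else f m))) := by
  simp only [PySem.Dict.insert, pv_contains_mapped_mem D f k hk, if_true, List.map_map]
  congr 1
  apply List.map_congr_left
  intro m _
  by_cases h : m = k
  · subst h; simp
  · simp [h]

theorem pv_insert_mapped_not_mem (D : List String) (f : String → List String) (k : String)
    (hk : k ∉ D) (v : List String) :
    (PySem.Dict.mk (D.map (fun m => (m, f m)))).insert k v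
      = PySem.Dict.mk (D.map (fun m => (m, f m)) ++ [(k, v)]) := by
  simp [PySem.Dict.insert, pv_contains_mapped D f k hk]

-- one conditional actor-addition of A, on a mapped dict with the key present
theorem pv_addStep (D : List String) (f : String → List String) (k : String) (hk : k ∈ D)
    (x : String) :
    (if ((PySem.Dict.mk (D.map (fun m => (m, f m)))).getD k []).contains x then
        PySem.Dict.mk (D.map (fun m => (m, f m)))
     else (PySem.Dict.mk (D.map (fun m => (m, f m)))).modify k [] (fun s => s ++ [x]))
      = PySem.Dict.mk (D.map (fun m => (m, if m = k then PySem.Set.add (f k) x else f m))) := by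
  have hg : (PySem.Dict.mk (D.map (fun m => (m, f m)))).getD k [] = f k := by
    simp [PySem.Dict.getD, pv_get?_mapped D f k hk]
  rw [hg]
  by_cases hx : (f k).contains x
  · have hx' : x ∈ f k := List.contains_iff_mem.mp hx
    simp only [hx, if_true]
    congr 1
    apply List.map_congr_left
    intro m _
    by_cases h : m = k
    · subst h; simp [PySem.Set.add, hx']
    · simp [h]
  · have hx' : x ∉ f k := fun h => hx (List.contains_iff_mem.mpr h)
    simp only [hx, Bool.false_eq_true, if_false, PySem.Dict.modify, hg,
      pv_insert_mapped_mem D f k hk]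
    congr 1
    apply List.map_congr_left
    intro m _
    by_cases h : m = k
    · subst h; simp [PySem.Set.add, hx']
    · simp [h]

-- A's loop body on a mapped dict: movie key already present
theorem pv_stepA_mem (D : List String) (f : String → List String) (x y k : String)
    (hk : k ∈ D) :
    pvStepA (PySem.Dict.mk (D.map (fun m => (m, f m)))) (x, y, k)
      = PySem.Dict.mk (D.map (fun m =>
          (m, if m = k then PySem.Set.add (PySem.Set.add (f k) x) y else f m))) := by
  simp only [pvStepA]
  rw [pv_get?_mapped D f k hk]
  simp only [Option.isNone_some, Bool.false_eq_true, if_false]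
  rw [pv_addStep D f k hk x]
  rw [pv_addStep D _ k hk y]
  congr 1
  apply List.map_congr_left
  intro m _
  by_cases h : m = k
  · subst h; simp
  · simp [h]

-- A's loop body on a mapped dict: new movie key, appended with its two actors
theorem pv_stepA_not_mem (D : List String) (f : String → List String) (x y k : String)
    (hk : k ∉ D) :
    pvStepA (PySem.Dict.mk (D.map (fun m => (m, f m)))) (x, y, k)
      = PySem.Dict.mk ((D ++ [k]).map (fun m =>
          (m, if m = k then PySem.Set.add (PySem.Set.add [] x) y else f m))) := by
  have hk' : k ∈ D ++ [k] := by simp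
  have hD' : D.map (fun m => (m, f m)) ++ [(k, [])]
      = (D ++ [k]).map (fun m => (m, if m = k then [] else f m)) := by
    have h1 : D.map (fun m => (m, f m))
        = D.map (fun m => (m, if m = k then [] else f m)) := by
      apply List.map_congr_left
      intro m hm
      have hmk : m ≠ k := fun h => hk (h ▸ hm)
      simp [hmk]
    rw [h1]
    simp
  simp only [pvStepA]
  rw [pv_get?_mapped_none D f k hk]
  simp only [Option.isNone_none, if_true]
  rw [pv_insert_mapped_not_mem D f k hk [], hD']
  rw [pv_addStep (D ++ [k]) _ k hk' x]
  rw [pv_addStep (D ++ [k]) _ k hk' y]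
  congr 1
  apply List.map_congr_left
  intro m _
  by_cases h : m = k
  · subst h; simp
  · simp [h]

-- collecting for a movie absent from the data yields the empty set
theorem pv_collect_nil (data : List (String × String × String)) (m : String)
    (hm : m ∉ data.map (fun r => r.2.2)) : pvCollect data m = [] := by
  unfold pvCollect
  induction data with
  | nil => rfl
  | cons r data ih =>
    simp only [List.map_cons, List.mem_cons, not_or] at hm
    have : (r.2.2 == m) = false := beq_eq_false_iff_ne.mpr (fun h => hm.1 h.symm)
    simp only [List.foldl_cons, this, Bool.false_eq_true, if_false]
    exact ih hm.2

theorem pv_collect_append (l : List (String × String × String)) (r : String × String × String)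
    (m : String) :
    pvCollect (l ++ [r]) m
      = if r.2.2 == m then PySem.Set.add (PySem.Set.add (pvCollect l m) r.1) r.2.1
        else pvCollect l m := by
  simp [pvCollect, List.foldl_append]

-- the loop invariant of A: its dict is the distinct keys mapped to their collected sets
theorem pv_A_invariant (data : List (String × String × String)) :
    data.foldl pvStepA (PySem.Dict.mk [])
      = PySem.Dict.mk ((PySem.Set.ofList (data.map (fun r => r.2.2))).map
          (fun m => (m, pvCollect data m))) := by
  induction data using List.reverseRecOn with
  | nil => rfl
  | append_singleton l r ih =>
    obtain ⟨x, y, k⟩ := r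
    rw [List.foldl_append, List.foldl_cons, List.foldl_nil, ih]
    have hkeys : PySem.Set.ofList ((l ++ [(x, y, k)]).map (fun t => t.2.2))
        = PySem.Set.add (PySem.Set.ofList (l.map (fun t => t.2.2))) k := by
      simp [PySem.Set.ofList, List.foldl_append]
    by_cases hk : k ∈ PySem.Set.ofList (l.map (fun t => t.2.2))
    · rw [pv_stepA_mem _ _ x y k hk, hkeys]
      have hadd : PySem.Set.add (PySem.Set.ofList (l.map (fun t => t.2.2))) k
          = PySem.Set.ofList (l.map (fun t => t.2.2)) := by
        simp [PySem.Set.add, hk]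
      rw [hadd]
      congr 1
      apply List.map_congr_left
      intro m hm
      rw [pv_collect_append]
      by_cases h : m = k
      · subst h; simp
      · have : (k == m) = false := beq_eq_false_iff_ne.mpr (fun h' => h h'.symm)
        simp [h, this]
    · rw [pv_stepA_not_mem _ _ x y k hk, hkeys]
      have hadd : PySem.Set.add (PySem.Set.ofList (l.map (fun t => t.2.2))) k
          = PySem.Set.ofList (l.map (fun t => t.2.2)) ++ [k] := by
        simp only [PySem.Set.add]
        have : (PySem.Set.ofList (l.map (fun t => t.2.2))).contains k = false := by
          rw [Bool.eq_false_iff]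
          exact fun hc => hk (List.contains_iff_mem.mp hc)
        rw [this]
        simp
      rw [hadd]
      have hcl : pvCollect l k = [] := by
        apply pv_collect_nil
        exact fun h => hk ((PySem.Set.mem_ofList _ _).mpr h)
      congr 1
      apply List.map_congr_left
      intro m hm
      rw [pv_collect_append]
      by_cases h : m = k
      · subst h; simp [hcl]
      · have hmD : m ∈ PySem.Set.ofList (l.map (fun t => t.2.2)) := by
          rcases List.mem_append.mp hm with h' | h'
          · exact h'
          · simp at h'; exact absurd h' h
        have : (k == m) = false := beq_eq_false_iff_ne.mpr (fun h' => h h'.symm)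
        simp [h, this]

-- B's fold of inserts over a nodup key list builds exactly the mapped items
theorem pv_B_build (D : List String) (hD : D.Nodup) (g : String → List String) :
    (D.foldl (fun book m => book.insert m (g m)) (PySem.Dict.mk [])).items
      = D.map (fun m => (m, g m)) := by
  induction D using List.reverseRecOn with
  | nil => rfl
  | append_singleton l k ih =>
    have hnd := hD
    simp only [List.nodup_append] at hnd
    have hl : l.Nodup := hnd.1
    have hkl : k ∉ l := fun h => hnd.2.2 k h k (by simp) rfl
    rw [List.foldl_append, List.foldl_cons, List.foldl_nil]
    have hfold : l.foldl (fun book m => book.insert m (g m)) (PySem.Dict.mk [])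
        = PySem.Dict.mk (l.map (fun m => (m, g m))) := by
      calc l.foldl (fun book m => book.insert m (g m)) (PySem.Dict.mk [])
          = PySem.Dict.mk ((l.foldl (fun book m => book.insert m (g m)) (PySem.Dict.mk [])).items) := rfl
        _ = _ := by rw [ih hl]
    rw [hfold, pv_insert_mapped_not_mem l g k hkl]
    simp

-- ===== VERDICT (by name: the statement is the Claim_ definition above) =====
theorem movie_list_spec : Claim_equal_movie_list := by
  intro data _
  show movie_list data = movie_list_alt data
  unfold movie_list movie_list_alt
  rw [pv_A_invariant data, PySem.List.dedup,
    pv_B_build _ (PySem.Set.nodup_ofList _) (pvCollect data)]
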